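-- pv_equiv track=rewrite | github.com/lukiyanov/DxeLoadingLoggerPkg | Source/make_guid_db_from_edk2_guids.py | guid_from_global_var
-- ===== SOURCE A (Python) =====
-- def guid_from_global_var(var):
--     # gAcousticSetupProtocolGuid -> ACOUSTIC_SETUP_PROTOCOL_GUID
--
--     if not var.startswith('g'):
--         return var
--
--     guid_name = ''
--     first_g = True
--     for char in var:
--         if first_g:
--             first_g = False
--             continue
--
--         if char.isupper():
--             guid_name += '_'
--             guid_name += char.upper()
--         else:
--             guid_name += char.upper()
--
--     return guid_name.lstrip('_')
-- ===== SOURCE B (Python) =====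
-- def _segments(s):
--     # split s into runs: a new run starts at every uppercase character
--     if not s:
--         return []
--     n = 1
--     while n < len(s) and not s[n].isupper():
--         n += 1
--     return [s[:n]] + _segments(s[n:])
--
--
-- def guid_from_global_var(var):
--     # gAcousticSetupProtocolGuid -> ACOUSTIC_SETUP_PROTOCOL_GUID
--     if not var.startswith('g'):
--         return var
--     return '_'.join(seg.upper() for seg in _segments(var[1:])).lstrip('_')
-- ===== Notes on version B (the rewrite author's own statement) =====
-- stated objective: alternative
-- what changed: Replaces the per-character append-with-conditional-underscore accumulator loop by a recursive partition of var[1:] into uppercase-started runs followed by a single '_'.join over the uppercased runs.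
import Mathlib
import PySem

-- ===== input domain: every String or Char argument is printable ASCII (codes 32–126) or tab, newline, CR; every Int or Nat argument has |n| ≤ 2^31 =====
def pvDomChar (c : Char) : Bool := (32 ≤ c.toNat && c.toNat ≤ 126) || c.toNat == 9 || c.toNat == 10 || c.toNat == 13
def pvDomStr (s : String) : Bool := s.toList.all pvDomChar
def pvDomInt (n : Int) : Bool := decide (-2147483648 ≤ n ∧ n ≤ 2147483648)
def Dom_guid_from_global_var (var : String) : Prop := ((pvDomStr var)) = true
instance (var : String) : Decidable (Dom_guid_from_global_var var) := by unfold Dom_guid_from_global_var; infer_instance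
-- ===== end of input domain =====

-- B replaces A's per-character accumulator loop by partitioning the body into uppercase-started runs and joining them with '_' (alternative decomposition, same cost).

-- ===== PORT A =====
-- A's loop body: state = (guid_name, first_g)
def guidLoopA (st : List Char × Bool) (char : Char) : List Char × Bool :=
  if st.2 then (st.1, false)
  else if PySem.Chars.isupper char then (st.1 ++ ['_', PySem.Chars.upperChar char], false)
  else (st.1 ++ [PySem.Chars.upperChar char], false)

def guid_from_global_var (var : String) : String :=
  if !(PySem.Str.startswith var "g") then var
  else
    let st := var.toList.foldl guidLoopA ([], true)
    -- .lstrip('_') with a single strip character: hand-ported as dropWhile (exact)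
    String.mk (st.1.dropWhile (· == '_'))

-- ===== PORT B =====
-- port of Source B's while loop 'advance n until s[n] is uppercase': returns (non-upper run, rest)
def pvRunB : List Char → List Char × List Char
  | [] => ([], [])
  | d :: ds =>
    if PySem.Chars.isupper d then ([], d :: ds)
    else
      let p := pvRunB ds
      (d :: p.1, p.2)

theorem pvRunB_snd_length_le (cs : List Char) : (pvRunB cs).2.length ≤ cs.length := by
  induction cs with
  | nil => simp [pvRunB]
  | cons d ds ih =>
    simp only [pvRunB]
    split
    · simp
    · simpa using Nat.le_succ_of_le ih

-- port of _segments
def pvSegmentsB : List Char → List (List Char)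
  | [] => []
  | c :: cs =>
    let p := pvRunB cs
    (c :: p.1) :: pvSegmentsB p.2
termination_by s => s.length
decreasing_by
  simpa using Nat.lt_succ_of_le (pvRunB_snd_length_le cs)

def guid_from_global_var_alt (var : String) : String :=
  if !(PySem.Str.startswith var "g") then var
  else
    -- '_'.join(seg.upper() for seg in _segments(var[1:])).lstrip('_')
    String.mk ((PySem.Chars.join ['_']
      ((pvSegmentsB (var.toList.drop 1)).map PySem.Chars.upper)).dropWhile (· == '_'))

-- ===== PRECONDITION & SPEC =====
def Spec_guid_from_global_var (var : String) (out : String) : Prop := out = guid_from_global_var_alt var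
instance (var : String) (out : String) : Decidable (Spec_guid_from_global_var var out) := by unfold Spec_guid_from_global_var; infer_instance

-- ===== CLAIM (what is proved, stated in full; the proofs are below) =====
def Claim_equal_guid_from_global_var : Prop := ∀ (var : String), Dom_guid_from_global_var var → Spec_guid_from_global_var var (guid_from_global_var var)

-- ===== LEMMAS AND PROOFS =====

-- what A's loop emits for one character of the body
def pvEmit (c : Char) : List Char :=
  if PySem.Chars.isupper c then ['_', PySem.Chars.upperChar c] else [PySem.Chars.upperChar c]

theorem foldlA_flat (body : List Char) : ∀ acc,
    body.foldl guidLoopA (acc, false) = (acc ++ body.flatMap pvEmit, false) := by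
  induction body with
  | nil => intro acc; simp
  | cons c cs ih =>
    intro acc
    by_cases h : PySem.Chars.isupper c = true <;>
      simp [guidLoopA, h, ih, pvEmit, List.append_assoc]

theorem pvRunB_append (cs : List Char) : (pvRunB cs).1 ++ (pvRunB cs).2 = cs := by
  induction cs with
  | nil => simp [pvRunB]
  | cons d ds ih =>
    simp only [pvRunB]
    split
    · simp
    · simpa using ih

theorem pvRunB_fst_not_upper (cs : List Char) :
    ∀ d ∈ (pvRunB cs).1, PySem.Chars.isupper d = false := by
  induction cs with
  | nil => simp [pvRunB]
  | cons d ds ih =>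
    simp only [pvRunB]
    split
    · simp
    · next h =>
      intro e he
      rcases List.mem_cons.mp he with h1 | h2
      · subst h1; simpa using h
      · exact ih e h2

theorem pvRunB_snd_head_upper (cs : List Char) :
    (pvRunB cs).2 = [] ∨ ∃ d ds, (pvRunB cs).2 = d :: ds ∧ PySem.Chars.isupper d = true := by
  induction cs with
  | nil => simp [pvRunB]
  | cons d ds ih =>
    simp only [pvRunB]
    split
    · next h => exact Or.inr ⟨d, ds, rfl, h⟩
    · simpa using ih

-- run of non-uppercase characters: A emits exactly the uppercased run
theorem flat_not_upper (run : List Char)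
    (h : ∀ d ∈ run, PySem.Chars.isupper d = false) :
    run.flatMap pvEmit = run.map PySem.Chars.upperChar := by
  induction run with
  | nil => simp
  | cons d ds ih =>
    have hd := h d (List.mem_cons_self ..)
    simp [pvEmit, hd, ih (fun e he => h e (List.mem_cons_of_mem _ he))]

theorem upper_eq_map (cs : List Char) :
    PySem.Chars.upper cs = cs.map PySem.Chars.upperChar := by
  simp [PySem.Chars.upper]

-- the core identity: A's emitted string is B's join, up to one optional leading '_'
theorem flat_eq_join (c : Char) (cs : List Char) :
    (c :: cs).flatMap pvEmit =
      (if PySem.Chars.isupper c then ['_'] else []) ++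
        PySem.Chars.join ['_'] ((pvSegmentsB (c :: cs)).map PySem.Chars.upper) := by
  induction hn : (c :: cs).length using Nat.strong_induction_on generalizing c cs with
  | _ n ih =>
  subst hn
  have hsplit := pvRunB_append cs
  have hrun := flat_not_upper (pvRunB cs).1 (pvRunB_fst_not_upper cs)
  rcases pvRunB_snd_head_upper cs with hrest | ⟨d, ds, hrest, hd⟩
  · -- rest empty: the whole body is a single segment
    have hcs : (pvRunB cs).1 = cs := by
      conv_rhs => rw [← hsplit, hrest]
      simp
    rw [pvSegmentsB]
    simp only [hrest, pvSegmentsB, List.map_cons, List.map_nil,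
      PySem.Chars.join_singleton, upper_eq_map, List.map_cons]
    rw [hcs] at hrun
    by_cases h : PySem.Chars.isupper c = true <;>
      simp [pvEmit, h, hrun, hcs]
  · -- rest = d :: ds with d uppercase: one more segment boundary
    have hlen : (d :: ds).length < (c :: cs).length := by
      have := pvRunB_snd_length_le cs
      rw [hrest] at this
      simpa using Nat.lt_succ_of_le this
    have ihr := ih (d :: ds).length hlen d ds rfl
    have hseg : pvSegmentsB (d :: ds) ≠ [] := by rw [pvSegmentsB]; simp
    obtain ⟨s1, ss, hss⟩ := List.exists_cons_of_ne_nil hseg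
    rw [pvSegmentsB]
    simp only [hrest]
    calc (c :: cs).flatMap pvEmit
        = pvEmit c ++ ((pvRunB cs).1 ++ (d :: ds)).flatMap pvEmit := by
            conv_lhs => rw [← hsplit, hrest]
            simp
      _ = pvEmit c ++ (pvRunB cs).1.map PySem.Chars.upperChar ++ (d :: ds).flatMap pvEmit := by
            simp [hrun, List.append_assoc]
      _ = pvEmit c ++ (pvRunB cs).1.map PySem.Chars.upperChar ++
            ('_' :: PySem.Chars.join ['_'] ((pvSegmentsB (d :: ds)).map PySem.Chars.upper)) := by
            rw [ihr]; simp [hd]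
      _ = _ := by
            rw [hss]
            simp only [List.map_cons, upper_eq_map, PySem.Chars.join_cons_cons]
            by_cases h : PySem.Chars.isupper c = true <;>
              simp [pvEmit, h, List.append_assoc]

-- ===== VERDICT (by name: the statement is the Claim_ definition above) =====
theorem guid_from_global_var_spec : Claim_equal_guid_from_global_var := by
  intro var _
  unfold Spec_guid_from_global_var guid_from_global_var guid_from_global_var_alt
  by_cases hg : PySem.Str.startswith var "g" = true
  · simp only [hg, Bool.not_true, Bool.false_eq_true, if_false]
    have : ['g'] <+: var.toList := by
      have := (PySem.Chars.startswith_iff var.toList ['g']).mp (by simpa using hg)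
      exact this
    obtain ⟨body, hbody⟩ := this
    have hvl : var.toList = 'g' :: body := by simpa using hbody.symm
    rw [hvl]
    simp only [List.foldl_cons, List.drop_succ_cons, List.drop_zero]
    have h1 : guidLoopA ([], true) 'g' = ([], false) := by simp [guidLoopA]
    rw [h1, foldlA_flat]
    cases body with
    | nil => simp [pvSegmentsB, PySem.Chars.join_nil]
    | cons c cs =>
      rw [flat_eq_join]
      by_cases h : PySem.Chars.isupper c = true <;> simp [h]
  · have hg' : PySem.Chars.startswith var.toList ['g'] = false := by
      simp only [PySem.Str.startswith_eq] at hg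
      simpa using hg
    simp [hg']
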